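-- pv_equiv track=rewrite | github.com/pypi-data/pypi-mirror-86 | packages/chemistry-tools/chemistry_tools-0.4.1.tar.gz/chemistry_tools-0.4.1/chemistry_tools/cas.py | check_cas_number
-- ===== SOURCE A (Python) =====
-- def check_cas_number(cas_no: int) -> int:
-- 	"""
-- 	Checks the CAS registry number to ensure the check digit is valid
-- 	with respect to the rest of the number.
--
-- 	If the CAS registry number is valid ``0`` is returned.
-- 	If there is a problem the difference between the computed check digit
-- 	and that given as part of the CAS registry number is returned.
--
-- 	:param cas_no:
-- 	"""  # noqa: D400
--
-- 	cas_no = abs(int(cas_no))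
--
-- 	check_digit = cas_no % 10
-- 	main_value = (cas_no - check_digit) // 10
-- 	block_2 = main_value % 100
-- 	block_1 = (main_value - block_2) // 100
--
-- 	last_digit = block_2 % 10
--
-- 	check_total = last_digit + (((block_2 - last_digit) // 10) * 2)
--
-- 	for position, digit in enumerate(str(block_1)[::-1]):
-- 		check_total += int(digit) * (position + 3)
--
-- 	if check_digit == check_total % 10:
-- 		return 0
-- 	else:
-- 		return (check_total % 10) - check_digit
-- ===== SOURCE B (Python) =====
-- def check_cas_number(cas_no: int) -> int:
-- 	"""
-- 	Checks the CAS registry number to ensure the check digit is valid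
-- 	with respect to the rest of the number.
-- 	"""
-- 	cas_no = abs(int(cas_no))
-- 	check_digit = cas_no % 10
-- 	n = cas_no // 10
-- 	total = 0
-- 	pos = 1
-- 	while n > 0:
-- 		total += (n % 10) * pos
-- 		pos += 1
-- 		n //= 10
-- 	rem = total % 10
-- 	if check_digit == rem:
-- 		return 0
-- 	return rem - check_digit
-- ===== Notes on version B (the rewrite author's own statement) =====
-- stated objective: simpler
-- what changed: Replaces A's block-splitting (block_2 arithmetic plus a string loop over str(block_1) reversed with offset weights) by one uniform arithmetic digit-extraction loop accumulating digit*position over all digits of cas_no//10.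
import Mathlib
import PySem

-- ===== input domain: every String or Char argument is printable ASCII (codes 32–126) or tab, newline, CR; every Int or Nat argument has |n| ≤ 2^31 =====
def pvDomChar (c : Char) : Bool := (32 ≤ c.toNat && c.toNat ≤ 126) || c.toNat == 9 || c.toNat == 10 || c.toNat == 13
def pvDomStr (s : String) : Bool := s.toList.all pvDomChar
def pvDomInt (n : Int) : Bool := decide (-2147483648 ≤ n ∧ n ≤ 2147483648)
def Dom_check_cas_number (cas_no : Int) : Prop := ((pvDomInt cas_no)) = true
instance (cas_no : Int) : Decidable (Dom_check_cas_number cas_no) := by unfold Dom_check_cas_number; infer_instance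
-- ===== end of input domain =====

-- B replaces A's block-splitting (block_2 arithmetic plus a string loop over
-- str(block_1) reversed) by one uniform arithmetic digit-extraction loop (simpler).


-- ===== PORT A =====
-- int(digit) for a one-character digit string produced by str(); exact there
-- (the default 0 is unreachable: str(block_1) contains only decimal digits).
def ccnCharVal (c : Char) : Int := (PySem.Int.ofChars? [c]).getD 0

def check_cas_number (cas_no : Int) : Int :=
  -- cas_no = abs(int(cas_no))
  let n : Int := (cas_no.natAbs : Int)
  let check_digit := PySem.Int.mod n 10
  let main_value := PySem.Int.floordiv (n - check_digit) 10
  let block_2 := PySem.Int.mod main_value 100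
  let block_1 := PySem.Int.floordiv (main_value - block_2) 100
  let last_digit := PySem.Int.mod block_2 10
  let check_total :=
    last_digit + (PySem.Int.floordiv (block_2 - last_digit) 10) * 2
  -- for position, digit in enumerate(str(block_1)[::-1]): check_total += int(digit) * (position + 3)
  let check_total :=
    (PySem.List.enumerate ((PySem.Int.toChars block_1).reverse) 0).foldl
      (fun acc pd => acc + ccnCharVal pd.2 * (pd.1 + 3)) check_total
  if check_digit == PySem.Int.mod check_total 10 then 0
  else PySem.Int.mod check_total 10 - check_digit

-- ===== PORT B =====
-- while n > 0: total += (n % 10) * pos; pos += 1; n //= 10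
def ccnAltLoop (n pos total : Int) : Int :=
  if 0 < n then
    ccnAltLoop (PySem.Int.floordiv n 10) (pos + 1) (total + PySem.Int.mod n 10 * pos)
  else total
termination_by n.toNat
decreasing_by
  have : PySem.Int.floordiv n 10 = n / 10 := PySem.Int.floordiv_eq_ediv_of_pos (by norm_num)
  rw [this]; omega

def check_cas_number_alt (cas_no : Int) : Int :=
  let n : Int := (cas_no.natAbs : Int)
  let check_digit := PySem.Int.mod n 10
  let total := ccnAltLoop (PySem.Int.floordiv n 10) 1 0
  let rem := PySem.Int.mod total 10
  if check_digit == rem then 0 else rem - check_digit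

-- ===== PRECONDITION & SPEC =====
def Spec_check_cas_number (cas_no : Int) (out : Int) : Prop := out = check_cas_number_alt cas_no
instance (cas_no : Int) (out : Int) : Decidable (Spec_check_cas_number cas_no out) := by unfold Spec_check_cas_number; infer_instance

-- ===== CLAIM (what is proved, stated in full; the proofs are below) =====
def Claim_equal_check_cas_number : Prop := ∀ (cas_no : Int), Dom_check_cas_number cas_no → Spec_check_cas_number cas_no (check_cas_number cas_no)

-- ===== LEMMAS AND PROOFS =====

-- weighted digit sum of a natural number, least-significant digit first
def ccnDigitSum (k : Nat) (w : Int) : Int :=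
  if k = 0 then 0 else (k % 10 : Nat) * w + ccnDigitSum (k / 10) (w + 1)
decreasing_by exact Nat.div_lt_self (Nat.pos_of_ne_zero (by assumption)) (by norm_num)

lemma ccnAltLoop_eq (k : Nat) : ∀ (pos total : Int),
    ccnAltLoop (k : Int) pos total = total + ccnDigitSum k pos := by
  induction k using Nat.strong_induction_on with
  | _ k ih =>
    intro pos total
    rw [ccnAltLoop, ccnDigitSum]
    by_cases hk : k = 0
    · simp [hk]
    · have hpos : (0 : Int) < (k : Int) := by positivity
      rw [if_pos hpos, if_neg hk]
      have hf : PySem.Int.floordiv (k : Int) 10 = ((k / 10 : Nat) : Int) := by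
        rw [PySem.Int.floordiv_eq_ediv_of_pos (by norm_num)]; omega
      have hm : PySem.Int.mod (k : Int) 10 = ((k % 10 : Nat) : Int) := by
        rw [PySem.Int.mod_eq_emod_of_pos (by norm_num)]; omega
      rw [hf, hm, ih (k / 10) (Nat.div_lt_self (Nat.pos_of_ne_zero hk) (by norm_num))]
      ring

lemma ccnCharVal_digitChar (d : Nat) (hd : d < 10) :
    ccnCharVal (Nat.digitChar d) = (d : Int) := by
  interval_cases d <;> decide

lemma ccnToDigitsCore_fuel (k : Nat) : ∀ (f₁ f₂ : Nat) (acc : List Char), k < f₁ → k < f₂ →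
    Nat.toDigitsCore 10 f₁ k acc = Nat.toDigitsCore 10 f₂ k acc := by
  induction k using Nat.strong_induction_on with
  | _ k ih =>
    intro f₁ f₂ acc h₁ h₂
    match f₁, f₂ with
    | f₁ + 1, f₂ + 1 =>
      simp only [Nat.toDigitsCore]
      by_cases h : k / 10 = 0
      · simp [h]
      · simp only [if_neg h]
        exact ih (k / 10) (Nat.div_lt_self (by omega) (by norm_num)) f₁ f₂ _
          (by omega) (by omega)

lemma ccnToDigitsCore_acc (k : Nat) : ∀ (f : Nat) (acc : List Char), k < f →
    Nat.toDigitsCore 10 f k acc = Nat.toDigitsCore 10 f k [] ++ acc := by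
  induction k using Nat.strong_induction_on with
  | _ k ih =>
    intro f acc hf
    match f with
    | f + 1 =>
      simp only [Nat.toDigitsCore]
      by_cases h : k / 10 = 0
      · simp [h]
      · simp only [if_neg h]
        have hlt : k / 10 < k := Nat.div_lt_self (by omega) (by norm_num)
        rw [ih (k / 10) hlt f _ (by omega), ih (k / 10) hlt f [Nat.digitChar (k % 10)] (by omega),
          List.append_assoc]
        rfl

-- str(k) for k ≥ 10 ends with the last decimal digit
lemma ccnToDigits_peel (k : Nat) (h : k / 10 ≠ 0) :
    Nat.toDigits 10 k = Nat.toDigits 10 (k / 10) ++ [Nat.digitChar (k % 10)] := by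
  unfold Nat.toDigits
  rw [show Nat.toDigitsCore 10 (k + 1) k [] = Nat.toDigitsCore 10 k (k / 10) [Nat.digitChar (k % 10)] by
      simp only [Nat.toDigitsCore]; rw [if_neg h],
    ccnToDigitsCore_acc (k / 10) k _ (by omega),
    ccnToDigitsCore_fuel (k / 10) k (k / 10 + 1) [] (by omega) (by omega)]

lemma ccnToDigits_small (k : Nat) (h : k / 10 = 0) :
    Nat.toDigits 10 k = [Nat.digitChar (k % 10)] := by
  unfold Nat.toDigits Nat.toDigitsCore
  rw [if_pos h]

-- A's string loop computes the weighted digit sum with weights starting at s + 3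
lemma ccnFold_eq (k : Nat) : ∀ (s total : Int),
    (PySem.List.enumerate ((Nat.toDigits 10 k).reverse) s).foldl
      (fun acc pd => acc + ccnCharVal pd.2 * (pd.1 + 3)) total
      = total + ccnDigitSum k (s + 3) := by
  induction k using Nat.strong_induction_on with
  | _ k ih =>
    intro s total
    by_cases h : k / 10 = 0
    · rw [ccnToDigits_small k h, List.reverse_singleton, PySem.List.enumerate_cons,
        PySem.List.enumerate_nil, List.foldl_cons, List.foldl_nil]
      simp only [ccnCharVal_digitChar (k % 10) (by omega)]
      rw [ccnDigitSum]
      by_cases hk : k = 0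
      · simp [hk]
      · rw [if_neg hk, h, show ccnDigitSum 0 (s + 3 + 1) = 0 from by rw [ccnDigitSum]; simp]
        ring
    · have hds : ccnDigitSum k (s + 3)
          = ((k % 10 : Nat) : Int) * (s + 3) + ccnDigitSum (k / 10) (s + 1 + 3) := by
        rw [ccnDigitSum, if_neg (by omega : ¬ k = 0),
          show s + 3 + 1 = s + 1 + 3 from by ring]
      rw [ccnToDigits_peel k h, List.reverse_append, List.reverse_singleton,
        List.singleton_append, PySem.List.enumerate_cons, List.foldl_cons,
        ih (k / 10) (Nat.div_lt_self (by omega) (by norm_num)) (s + 1) _, hds]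
      simp only [ccnCharVal_digitChar (k % 10) (by omega)]
      ring

-- unfolding the weighted digit sum twice
lemma ccnDigitSum_two (M : Nat) :
    ccnDigitSum M 1 = (M % 10 : Nat) + (M / 10 % 10 : Nat) * 2 + ccnDigitSum (M / 100) 3 := by
  by_cases h0 : M = 0
  · subst h0
    rw [show ccnDigitSum 0 1 = 0 from by rw [ccnDigitSum]; simp,
      show ccnDigitSum 0 3 = 0 from by rw [ccnDigitSum]; simp]
    simp
  · rw [ccnDigitSum, if_neg h0]
    by_cases h1 : M / 10 = 0
    · rw [h1, show M / 100 = 0 by omega,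
        show ccnDigitSum 0 (1 + 1) = 0 from by rw [ccnDigitSum]; simp,
        show ccnDigitSum 0 3 = 0 from by rw [ccnDigitSum]; simp]
      simp
    · rw [ccnDigitSum, if_neg h1, Nat.div_div_eq_div_mul]
      push_cast
      ring_nf

-- ===== VERDICT (by name: the statement is the Claim_ definition above) =====
theorem check_cas_number_spec : Claim_equal_check_cas_number := by
  intro cas_no _
  unfold Spec_check_cas_number check_cas_number check_cas_number_alt
  dsimp only
  set m : Nat := cas_no.natAbs with hm
  have e1 : PySem.Int.mod (m : Int) 10 = ((m % 10 : Nat) : Int) := by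
    rw [PySem.Int.mod_eq_emod_of_pos (by norm_num)]; omega
  rw [e1]
  have e3 : PySem.Int.floordiv ((m : Int) - ((m % 10 : Nat) : Int)) 10 = ((m / 10 : Nat) : Int) := by
    rw [PySem.Int.floordiv_eq_ediv_of_pos (by norm_num)]; omega
  rw [e3]
  have e3' : PySem.Int.floordiv (m : Int) 10 = ((m / 10 : Nat) : Int) := by
    rw [PySem.Int.floordiv_eq_ediv_of_pos (by norm_num)]; omega
  rw [e3']
  set M : Nat := m / 10 with hM
  have b2 : PySem.Int.mod (M : Int) 100 = ((M % 100 : Nat) : Int) := by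
    rw [PySem.Int.mod_eq_emod_of_pos (by norm_num)]; omega
  rw [b2]
  have b1 : PySem.Int.floordiv ((M : Int) - ((M % 100 : Nat) : Int)) 100 = ((M / 100 : Nat) : Int) := by
    rw [PySem.Int.floordiv_eq_ediv_of_pos (by norm_num)]; omega
  rw [b1]
  have ld : PySem.Int.mod ((M % 100 : Nat) : Int) 10 = ((M % 10 : Nat) : Int) := by
    rw [PySem.Int.mod_eq_emod_of_pos (by norm_num)]; omega
  rw [ld]
  have bd : PySem.Int.floordiv (((M % 100 : Nat) : Int) - ((M % 10 : Nat) : Int)) 10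
      = ((M / 10 % 10 : Nat) : Int) := by
    rw [PySem.Int.floordiv_eq_ediv_of_pos (by norm_num)]; omega
  rw [bd]
  have tc : PySem.Int.toChars ((M / 100 : Nat) : Int) = Nat.toDigits 10 (M / 100) := by
    unfold PySem.Int.toChars
    rw [if_neg (by omega : ¬ ((M / 100 : Nat) : Int) < 0)]
    congr 1
  rw [tc, ccnFold_eq (M / 100) 0
      (((M % 10 : Nat) : Int) + ((M / 10 % 10 : Nat) : Int) * 2)]
  rw [ccnAltLoop_eq M 1 0]
  rw [show ((M % 10 : Nat) : Int) + ((M / 10 % 10 : Nat) : Int) * 2 + ccnDigitSum (M / 100) (0 + 3)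
      = 0 + ccnDigitSum M 1 from by rw [ccnDigitSum_two M]; push_cast; ring]
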